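-- pv_equiv track=rewrite | github.com/gregstoll/cluesolver | clueengine.py | transposeClauses
-- ===== SOURCE A (Python) =====
-- def transposeClauses(possibleCards):
--     cardClauses = {}
--     for i in range(len(possibleCards)):
--         clause = possibleCards[i]
--         for card in clause:
--             if card in cardClauses:
--                 cardClauses[card].add(i)
--             else:
--                 cardClauses[card] = set([i])
--     return cardClauses
-- ===== SOURCE B (Python) =====
-- def transposeClauses(possibleCards):
--     order = list(dict.fromkeys(card for clause in possibleCards for card in clause))
--     return {card: {i for i, clause in enumerate(possibleCards) if card in clause}
--             for card in order}
-- ===== Notes on version B (the rewrite author's own statement) =====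
-- stated objective: idiomatic
-- what changed: Instead of accumulating an inverted index one pass over indexed clauses, B first collects the distinct cards in order of first appearance and then, per card, re-scans all clauses with enumerate to gather the indices containing it.
import Mathlib
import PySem

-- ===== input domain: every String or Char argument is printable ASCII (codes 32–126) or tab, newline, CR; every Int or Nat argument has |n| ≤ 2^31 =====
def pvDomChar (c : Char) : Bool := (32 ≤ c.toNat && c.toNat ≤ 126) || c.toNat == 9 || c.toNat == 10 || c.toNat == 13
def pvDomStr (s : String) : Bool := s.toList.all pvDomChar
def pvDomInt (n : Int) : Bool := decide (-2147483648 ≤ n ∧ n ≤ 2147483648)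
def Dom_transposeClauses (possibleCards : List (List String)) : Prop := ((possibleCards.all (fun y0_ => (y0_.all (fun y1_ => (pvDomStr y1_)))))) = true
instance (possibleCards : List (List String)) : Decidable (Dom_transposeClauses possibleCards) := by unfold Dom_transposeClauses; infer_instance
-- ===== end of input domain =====

-- B inverts the traversal (outer loop over the distinct cards in first-appearance order,
-- inner re-scan of all clauses per card) instead of A's one-pass accumulation of an
-- inverted index; objective: idiomatic.

-- ===== PORT A =====
def transposeClauses (possibleCards : List (List String)) : List (String × List Int) :=
  ((PySem.List.pyRange 0 (PySem.List.len possibleCards) 1).foldl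
    (fun cardClauses i =>
      let clause := PySem.List.pyGetD possibleCards i []
      clause.foldl
        (fun cardClauses card =>
          if cardClauses.contains card then
            cardClauses.modify card [] (fun s => PySem.Set.add s i)
          else
            cardClauses.insert card [i])
        cardClauses)
    PySem.Dict.empty).items

-- ===== PORT B =====
def transposeClauses_alt (possibleCards : List (List String)) : List (String × List Int) :=
  let order := PySem.List.dedup (possibleCards.flatMap (fun clause => clause))
  order.map (fun card =>
    (card, PySem.Set.ofList
      (((PySem.List.enumerate possibleCards 0).filter
          (fun p => decide (card ∈ p.2))).map (fun p => p.1))))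

-- ===== PRECONDITION & SPEC =====
def Spec_transposeClauses (possibleCards : List (List String)) (out : List (String × List Int)) : Prop := out = transposeClauses_alt possibleCards
instance (possibleCards : List (List String)) (out : List (String × List Int)) : Decidable (Spec_transposeClauses possibleCards out) := by unfold Spec_transposeClauses; infer_instance

-- ===== CLAIM (what is proved, stated in full; the proofs are below) =====
def Claim_equal_transposeClauses : Prop := ∀ (possibleCards : List (List String)), Dom_transposeClauses possibleCards → Spec_transposeClauses possibleCards (transposeClauses possibleCards)

-- ===== LEMMAS AND PROOFS =====

-- A's inner loop over one clause, named for the proofs (identical to the fold inside port A).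
def pvInner (i : Int) (d : PySem.Dict String (List Int)) (cl : List String) :
    PySem.Dict String (List Int) :=
  cl.foldl
    (fun cardClauses card =>
      if cardClauses.contains card then
        cardClauses.modify card [] (fun s => PySem.Set.add s i)
      else
        cardClauses.insert card [i])
    d

-- a fold of Set.add from an arbitrary start splits off the already-present elements
theorem pvFoldAdd_split_aux {α : Type} [BEq α] [LawfulBEq α] [DecidableEq α]
    (n : Nat) : ∀ (xs : List α), xs.length ≤ n → ∀ (s : List α),
    List.foldl PySem.Set.add s xs
      = s ++ List.foldl PySem.Set.add [] (xs.filter (fun x => decide (x ∉ s))) := by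
  induction n with
  | zero =>
    intro xs hl s
    have : xs = [] := List.eq_nil_of_length_eq_zero (Nat.le_zero.mp hl)
    simp [this]
  | succ n ih =>
    intro xs hl s
    match xs with
    | [] => simp
    | x :: rest =>
      have hr : rest.length ≤ n := by simpa using hl
      by_cases hx : x ∈ s
      · have h1 : PySem.Set.add s x = s := PySem.Set.add_of_mem hx
        simp only [List.foldl_cons, h1]
        have h3 : List.filter (fun y => decide (y ∉ s)) (x :: rest)
            = rest.filter (fun y => decide (y ∉ s)) := by simp [hx]
        rw [h3, ih rest hr s]
      · have h1 : PySem.Set.add s x = s ++ [x] := PySem.Set.add_of_not_mem hx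
        have h2 : PySem.Set.add ([] : List α) x = [x] := by simp [PySem.Set.add]
        have h3 : List.filter (fun y => decide (y ∉ s)) (x :: rest)
            = x :: rest.filter (fun y => decide (y ∉ s)) := by simp [hx]
        rw [List.foldl_cons, h1, ih rest hr (s ++ [x]), h3, List.foldl_cons, h2,
          ih (rest.filter (fun y => decide (y ∉ s))) (le_trans (List.length_filter_le _ _) hr) [x]]
        have h4 : (rest.filter (fun y => decide (y ∉ s))).filter (fun y => decide (y ∉ ([x] : List α)))
            = rest.filter (fun y => decide (y ∉ s ++ [x])) := by
          rw [List.filter_filter]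
          apply List.filter_congr
          intro y _
          simp [and_comm]
        rw [h4]
        simp

theorem pvFoldAdd_split {α : Type} [BEq α] [LawfulBEq α] [DecidableEq α]
    (xs : List α) (s : List α) :
    List.foldl PySem.Set.add s xs
      = s ++ List.foldl PySem.Set.add [] (xs.filter (fun x => decide (x ∉ s))) :=
  pvFoldAdd_split_aux xs.length xs le_rfl s

theorem pvDedup_cons {α : Type} [BEq α] [LawfulBEq α] [DecidableEq α] (a : α) (xs : List α) :
    PySem.List.dedup (a :: xs) = a :: PySem.List.dedup (xs.filter (fun x => decide (x ≠ a))) := by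
  have h2 : PySem.Set.empty.add a = ([a] : List α) := by simp [PySem.Set.add, PySem.Set.empty]
  rw [PySem.List.dedup, PySem.Set.ofList, List.foldl_cons, h2, pvFoldAdd_split]
  have h4 : xs.filter (fun y => decide (y ∉ ([a] : List α))) = xs.filter (fun x => decide (x ≠ a)) := by
    apply List.filter_congr; intro y _; simp
  rw [h4]
  rfl

theorem pvDedup_append {α : Type} [BEq α] [LawfulBEq α] [DecidableEq α] (xs ys : List α) :
    PySem.List.dedup (xs ++ ys)
      = PySem.List.dedup xs ++ PySem.List.dedup (ys.filter (fun y => decide (y ∉ xs))) := by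
  rw [PySem.List.dedup, PySem.Set.ofList, List.foldl_append, pvFoldAdd_split]
  have h4 : ys.filter (fun y => decide (y ∉ List.foldl PySem.Set.add PySem.Set.empty xs))
      = ys.filter (fun y => decide (y ∉ xs)) := by
    apply List.filter_congr; intro y _
    have h5 : y ∈ List.foldl PySem.Set.add PySem.Set.empty xs ↔ y ∈ xs := PySem.Set.mem_ofList xs y
    simp only [decide_eq_decide]
    exact not_congr h5
  rw [h4]
  rfl

-- inner-loop characterisation: existing keys hit by the clause gain i, fresh cards append
theorem pvInner_items (i : Int) (cl : List String) (d : PySem.Dict String (List Int))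
    (hnd : d.keys.Nodup) :
    (pvInner i d cl).items
      = d.items.map (fun p => (p.1, if p.1 ∈ cl then PySem.Set.add p.2 i else p.2))
        ++ (PySem.List.dedup (cl.filter (fun c => !(d.contains c)))).map (fun c => (c, [i])) := by
  induction cl generalizing d with
  | nil =>
    simp [pvInner, PySem.List.dedup, PySem.Set.ofList, PySem.Set.empty]
  | cons card rest ih =>
    by_cases h : d.contains card = true
    · have hstep : pvInner i d (card :: rest)
          = pvInner i (d.modify card [] (fun s => PySem.Set.add s i)) rest := by
        simp [pvInner, List.foldl_cons, h]
      set d' := d.modify card [] (fun s => PySem.Set.add s i) with hd'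
      have hnd' : d'.keys.Nodup := PySem.Dict.nodup_keys_insert _ _ _ hnd
      rw [hstep, ih d' hnd']
      have hitems' : d'.items = d.items.map (fun p =>
          if (p.1 == card) = true then (card, PySem.Set.add (d.getD card []) i) else p) :=
        PySem.Dict.items_insert_of_contains d _ h
      congr 1
      · rw [hitems', List.map_map]
        apply List.map_congr_left
        intro p hp
        by_cases hpc : p.1 = card
        · have hget : d.getD card [] = p.2 := by
            have : d.get? card = some p.2 := by
              apply PySem.Dict.get?_of_mem_items (d := d) _ hnd
              rw [← hpc]; exact hp
            simp [PySem.Dict.getD, this]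
          simp [Function.comp, hpc, hget]
        · simp [Function.comp, hpc, beq_iff_eq]
      · have hc' : ∀ c, d'.contains c = (c == card || d.contains c) := fun c =>
          PySem.Dict.contains_modify d card c [] _
        have hfilter : rest.filter (fun c => !(d'.contains c))
            = (card :: rest).filter (fun c => !(d.contains c)) := by
          have hcard : (!(d.contains card)) = false := by simp [h]
          simp only [List.filter_cons, hcard]
          apply List.filter_congr
          intro c _
          rw [hc']
          by_cases hcc : c = card
          · simp [hcc, h]
          · simp [hcc]
        rw [hfilter]
    · have h' : d.contains card = false := by simpa using h
      have hstep : pvInner i d (card :: rest) = pvInner i (d.insert card [i]) rest := by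
        simp [pvInner, List.foldl_cons, h']
      set d' := d.insert card [i] with hd'
      have hnd' : d'.keys.Nodup := PySem.Dict.nodup_keys_insert _ _ _ hnd
      rw [hstep, ih d' hnd']
      have hitems' : d'.items = d.items ++ [(card, [i])] :=
        PySem.Dict.items_insert_of_not_contains d _ h'
      have hne : ∀ p ∈ d.items, p.1 ≠ card := by
        intro p hp hpc
        have : card ∈ d.keys := by
          simp only [PySem.Dict.keys]
          exact List.mem_map.mpr ⟨p, hp, hpc⟩
        exact h ((PySem.Dict.contains_iff_mem_keys d card).mpr this)
      rw [hitems', List.map_append]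
      have hsing : [((card : String), ([i] : List Int))].map
          (fun p => (p.1, if p.1 ∈ rest then PySem.Set.add p.2 i else p.2)) = [(card, [i])] := by
        by_cases hcr : card ∈ rest <;> simp [hcr]
      rw [hsing]
      have hsplit : (card :: rest).filter (fun c => !(d.contains c))
          = card :: rest.filter (fun c => !(d.contains c)) := by
        simp [h']
      have htarget : PySem.List.dedup ((card :: rest).filter (fun c => !(d.contains c)))
          = card :: PySem.List.dedup ((rest.filter (fun c => !(d.contains c))).filter
              (fun c => decide (c ≠ card))) := by
        rw [hsplit, pvDedup_cons]
      have hfilts : rest.filter (fun c => !(d'.contains c))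
          = (rest.filter (fun c => !(d.contains c))).filter (fun c => decide (c ≠ card)) := by
        rw [List.filter_filter]
        apply List.filter_congr
        intro c _
        rw [hd', PySem.Dict.contains_insert]
        by_cases hcc : c = card
        · simp [hcc]
        · simp [hcc]
      have hmapeq : d.items.map (fun p => (p.1, if p.1 ∈ rest then PySem.Set.add p.2 i else p.2))
          = d.items.map (fun p => (p.1, if p.1 ∈ card :: rest then PySem.Set.add p.2 i else p.2)) := by
        apply List.map_congr_left
        intro p hp
        have := hne p hp
        simp [List.mem_cons, this]
      rw [hmapeq, htarget, hfilts]
      simp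

-- outer-loop characterisation: A's whole fold builds exactly the inverted index
theorem pvOuter_items (ps : List (Int × List String))
    (hlt : (ps.map (fun p => p.1)).Pairwise (· < ·)) :
    (ps.foldl (fun d p => pvInner p.1 d p.2) PySem.Dict.empty).items
      = (PySem.List.dedup ((ps.map (fun p => p.2)).flatten)).map
          (fun c => (c, (ps.filter (fun p => decide (c ∈ p.2))).map (fun p => p.1))) := by
  induction ps using List.reverseRecOn with
  | nil =>
    simp [PySem.Dict.empty, PySem.List.dedup, PySem.Set.ofList, PySem.Set.empty]
  | append_singleton ps q ih =>
    obtain ⟨i, cl⟩ := q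
    have hlt' : (ps.map (fun p => p.1)).Pairwise (· < ·) := by
      rw [List.map_append] at hlt
      exact (List.pairwise_append.mp hlt).1
    have hbound : ∀ j ∈ ps.map (fun p => p.1), j < i := by
      rw [List.map_append] at hlt
      intro j hj
      have := (List.pairwise_append.mp hlt).2.2
      simpa using this j hj
    set D := ps.foldl (fun d p => pvInner p.1 d p.2) PySem.Dict.empty with hD
    set X := (ps.map (fun p => p.2)).flatten with hX
    have hitems : D.items = (PySem.List.dedup X).map
        (fun c => (c, (ps.filter (fun p => decide (c ∈ p.2))).map (fun p => p.1))) := ih hlt'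
    have hkeys : D.keys = PySem.List.dedup X := by
      rw [PySem.Dict.keys, hitems, List.map_map]
      simp [Function.comp_def]
    have hDnodup : D.keys.Nodup := by
      rw [hkeys, PySem.List.dedup]
      exact PySem.Set.nodup_ofList X
    have hcontains : ∀ c, D.contains c = decide (c ∈ X) := by
      intro c
      by_cases hc : c ∈ X
      · have : c ∈ D.keys := by
          rw [hkeys, PySem.List.dedup]
          exact (PySem.Set.mem_ofList _ _).mpr hc
        simp [(PySem.Dict.contains_iff_mem_keys D c).mpr this, hc]
      · have : c ∉ D.keys := by
          rw [hkeys, PySem.List.dedup]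
          exact fun hmem => hc ((PySem.Set.mem_ofList _ _).mp hmem)
        have h2 : ¬ D.contains c = true := fun h => this ((PySem.Dict.contains_iff_mem_keys D c).mp h)
        simp [hc]
        exact Bool.not_eq_true _ |>.mp h2
    rw [List.foldl_append]
    simp only [List.foldl_cons, List.foldl_nil]
    rw [pvInner_items i cl D hDnodup, hitems]
    have hflat : ((ps ++ [(i, cl)]).map (fun p => p.2)).flatten = X ++ cl := by
      simp [hX]
    rw [hflat, pvDedup_append]
    rw [List.map_append]
    congr 1
    · rw [List.map_map]
      apply List.map_congr_left
      intro c hc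
      have hvsub : ∀ j ∈ (ps.filter (fun p => decide (c ∈ p.2))).map (fun p => p.1), j < i := by
        intro j hj
        apply hbound
        obtain ⟨p, hp, hpj⟩ := List.mem_map.mp hj
        exact List.mem_map.mpr ⟨p, (List.mem_filter.mp hp).1, hpj⟩
      have hnotmem : i ∉ (ps.filter (fun p => decide (c ∈ p.2))).map (fun p => p.1) := by
        intro hmem
        exact lt_irrefl i (hvsub i hmem)
      by_cases hccl : c ∈ cl
      · simp only [Function.comp, hccl, if_pos]
        rw [PySem.Set.add_of_not_mem hnotmem]
        simp [List.filter_append, hccl]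
      · simp only [Function.comp, hccl]
        simp [List.filter_append, hccl]
    · have hfeq : cl.filter (fun c => !(D.contains c)) = cl.filter (fun c => decide (c ∉ X)) := by
        apply List.filter_congr
        intro c _
        rw [hcontains c]
        simp
      rw [hfeq]
      apply List.map_congr_left
      intro c hc
      have hcX : c ∉ X := by
        have := List.of_mem_filter (PySem.Set.mem_ofList _ _ |>.mp (by
          rw [PySem.List.dedup] at hc; exact hc))
        simpa using this
      have hnil : ps.filter (fun p => decide (c ∈ p.2)) = [] := by
        rw [List.filter_eq_nil_iff]
        intro p hp hcp
        apply hcX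
        rw [hX]
        simp only [List.mem_flatten]
        exact ⟨p.2, List.mem_map.mpr ⟨p, hp, rfl⟩, by simpa using hcp⟩
      have hccl : c ∈ cl := by
        have := List.mem_filter.mp (PySem.Set.mem_ofList _ _ |>.mp (by
          rw [PySem.List.dedup] at hc; exact hc))
        exact this.1
      simp [List.filter_append, hnil, hccl]

-- ===== VERDICT (by name: the statement is the Claim_ definition above) =====
theorem transposeClauses_spec : Claim_equal_transposeClauses := by
  intro pcs _
  show transposeClauses pcs = transposeClauses_alt pcs
  have hA : transposeClauses pcs
      = ((PySem.List.enumerate pcs 0).foldl (fun d p => pvInner p.1 d p.2) PySem.Dict.empty).items := by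
    rw [transposeClauses, PySem.List.enumerate_eq_map_pyRange pcs [], List.foldl_map]
    rfl
  have hlt : ((PySem.List.enumerate pcs 0).map (fun p => p.1)).Pairwise (· < ·) := by
    rw [PySem.List.map_fst_enumerate]
    exact PySem.List.pairwise_lt_pyRange_one 0 (0 + pcs.length)
  rw [hA, pvOuter_items _ hlt, PySem.List.map_snd_enumerate]
  rw [transposeClauses_alt]
  have hflat : pcs.flatMap (fun clause => clause) = pcs.flatten := List.flatMap_id'
  rw [hflat]
  apply List.map_congr_left
  intro c _
  congr 1
  rw [PySem.Set.ofList_eq_self_of_nodup]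
  have hpw : (((PySem.List.enumerate pcs 0).filter (fun p => decide (c ∈ p.2))).map
      (fun p => p.1)).Pairwise (· < ·) := by
    apply List.Pairwise.map
    · exact fun a b h => h
    · exact (PySem.List.pairwise_lt_enumerate pcs 0).filter _
  exact hpw.imp (fun h => ne_of_lt h)
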